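-- pv_equiv track=rewrite | github.com/DanielAugust0o/Cursoemvideo-Python | CoderByte/arraychallenge.py | ArrayChallenge
-- ===== SOURCE A (Python) =====
-- def ArrayChallenge(arr):
--     #verificar se o arry não está vazio
--     if not arr:
--         return False
--
--     # removendo '[]'
--     arr = arr.strip('[]')
--
--     # Convertendo array para numeros inteiros e removendo a virgula
--     arr = [int(num) for num in arr.split(',') if num.strip()]
--
--     # Encontrando o maior numero do array
--     n_max = max(arr)
--
--     #somando os numeros e tirando o maior
--     soma = sum(num for num in arr if num != n_max)
--
--
--     #Verificando se a soma dos numeros é igual ao maior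
--
--     return soma >= n_max
-- ===== SOURCE B (Python) =====
-- def ArrayChallenge(arr):
--     if not arr:
--         return False
--     arr = arr.strip('[]')
--     arr = [int(num) for num in arr.split(',') if num.strip()]
--     total = 0
--     cur_max = None
--     count = 0
--     for num in arr:
--         total += num
--         if cur_max is None or num > cur_max:
--             cur_max = num
--             count = 1
--         elif num == cur_max:
--             count += 1
--     return total - cur_max * count >= cur_max
-- ===== Notes on version B (the rewrite author's own statement) =====
-- stated objective: alternative
-- what changed: A scans the parsed list three times (builds the list, then max(), then a filtered generator sum); B makes one stateful pass keeping a running total, the current maximum and its multiplicity, and ends with total - cur_max*count >= cur_max.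
import Mathlib
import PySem

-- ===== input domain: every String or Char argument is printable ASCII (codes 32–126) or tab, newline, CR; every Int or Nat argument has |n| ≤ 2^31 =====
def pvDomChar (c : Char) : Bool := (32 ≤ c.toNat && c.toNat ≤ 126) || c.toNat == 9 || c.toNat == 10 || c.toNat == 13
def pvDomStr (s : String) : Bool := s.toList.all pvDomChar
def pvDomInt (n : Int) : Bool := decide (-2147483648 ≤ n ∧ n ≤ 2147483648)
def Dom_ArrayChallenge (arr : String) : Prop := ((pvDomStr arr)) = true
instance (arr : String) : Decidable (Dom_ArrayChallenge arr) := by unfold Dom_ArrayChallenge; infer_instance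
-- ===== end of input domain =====

-- B replaces A's three scans of the parsed list (max, filtered-sum comprehension) by one
-- stateful pass keeping (running total, current max, multiplicity of that max); alternative decomposition.


-- ===== PORT A =====
-- arr.strip('[]'); [int(num) for num in arr.split(',') if num.strip()]
-- (int() raises ValueError on unparsable tokens: those inputs are outside Pre_, getD 0 is never reached there)
def pvNumsA (arr : String) : List Int :=
  (((PySem.Str.split? (PySem.Str.stripChars arr "[]") ",").getD []).filter
      (fun num => PySem.Str.strip num != "")).map
    (fun num => (PySem.Int.ofStr? num).getD 0)

-- n_max = max(arr); soma = sum(num for num in arr if num != n_max); return soma >= n_max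
-- (max(arr) raises ValueError on an empty list: outside Pre_, the port returns false there)
def pvCheckA (nums : List Int) : Bool :=
  match PySem.List.max? nums (fun y => y) with
  | none => false
  | some nMax =>
    let soma := (nums.filter (fun num => num != nMax)).sum
    decide (soma ≥ nMax)

def ArrayChallenge (arr : String) : Bool :=
  if arr == "" then false
  else pvCheckA (pvNumsA arr)

-- ===== PORT B =====
-- identical parsing prefix of Source B
def pvNumsB (arr : String) : List Int :=
  (((PySem.Str.split? (PySem.Str.stripChars arr "[]") ",").getD []).filter
      (fun num => PySem.Str.strip num != "")).map
    (fun num => (PySem.Int.ofStr? num).getD 0)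

-- one iteration of Source B's loop over state (total, cur_max, count)
def pvStep (s : Int × Option Int × Int) (num : Int) : Int × Option Int × Int :=
  let total := s.1 + num
  match s.2.1 with
  | none => (total, some num, 1)
  | some m =>
    if num > m then (total, some num, 1)
    else if num == m then (total, some m, s.2.2 + 1)
    else (total, some m, s.2.2)

-- the final 'return total - cur_max * count >= cur_max'
-- (cur_max is still None on an empty parsed list and Source B raises TypeError: outside Pre_, the port returns false)
def pvFinish (st : Int × Option Int × Int) : Bool :=
  match st.2.1 with
  | none => false
  | some m => decide (st.1 - m * st.2.2 ≥ m)

def ArrayChallenge_alt (arr : String) : Bool :=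
  if arr == "" then false
  else pvFinish ((pvNumsB arr).foldl pvStep (0, none, 0))

-- ===== PRECONDITION & SPEC =====
-- Pre_ excludes exactly the inputs where the Python programs raise: a nonempty string whose parsed
-- list is empty (max()/cur_max raise) or containing a non-integer token (int() raises ValueError).
def Pre_ArrayChallenge (arr : String) : Prop :=
  arr = "" ∨
    (let toks := ((PySem.Str.split? (PySem.Str.stripChars arr "[]") ",").getD []).filter
        (fun num => PySem.Str.strip num != "")
     toks ≠ [] ∧ ∀ t ∈ toks, (PySem.Int.ofStr? t).isSome)
instance (arr : String) : Decidable (Pre_ArrayChallenge arr) := by unfold Pre_ArrayChallenge; infer_instance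

def pvWitness_ArrayChallenge : String := "[1, 2, 3]"

def Spec_ArrayChallenge (arr : String) (out : Bool) : Prop := out = ArrayChallenge_alt arr
instance (arr : String) (out : Bool) : Decidable (Spec_ArrayChallenge arr out) := by unfold Spec_ArrayChallenge; infer_instance

-- ===== CLAIM (what is proved, stated in full; the proofs are below) =====
def Claim_equal_ArrayChallenge : Prop := ∀ (arr : String), Dom_ArrayChallenge arr → Pre_ArrayChallenge arr → Spec_ArrayChallenge arr (ArrayChallenge arr)

-- ===== LEMMAS AND PROOFS =====

-- Source B's loop, started after its first element: totals the list, tracks the running max m,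
-- and counts the occurrences of the final max (continuing cnt if the max never changed).
theorem pvFold_spec (l : List Int) (total m cnt : Int) :
    l.foldl pvStep (total, some m, cnt) =
      (total + l.sum, some (l.foldl max m),
        (if l.foldl max m = m then cnt else 0) + (l.count (l.foldl max m) : Int)) := by
  induction l generalizing total m cnt with
  | nil => simp
  | cons x t ih =>
    have hx := (PySem.List.le_foldl_max t x).1
    rcases lt_trichotomy x m with h | h | h
    · -- x < m : keep m, count unchanged
      have hstep : pvStep (total, some m, cnt) x = (total + x, some m, cnt) := by
        have h1 : ¬ x > m := by omega
        have h2 : (x == m) = false := by simp; omega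
        simp [pvStep, h1, h2]
      have hmax : max m x = m := by omega
      rw [List.foldl_cons, hstep, ih, List.foldl_cons, hmax]
      have hM := (PySem.List.le_foldl_max t m).1
      have hne : t.foldl max m ≠ x := by omega
      simp [hne.symm, add_assoc]
    · -- x = m : keep m, count + 1
      subst h
      have hstep : pvStep (total, some x, cnt) x = (total + x, some x, cnt + 1) := by
        simp [pvStep]
      have hmax : max x x = x := by omega
      rw [List.foldl_cons, hstep, ih, List.foldl_cons, hmax]
      by_cases hM : t.foldl max x = x
      · simp [hM, add_assoc]; omega
      · simp [hM, Ne.symm hM, add_assoc]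
    · -- x > m : reset to x with count 1
      have hstep : pvStep (total, some m, cnt) x = (total + x, some x, 1) := by
        simp [pvStep, h]
      have hmax : max m x = x := by omega
      rw [List.foldl_cons, hstep, ih, List.foldl_cons, hmax]
      have hne : t.foldl max x ≠ m := by omega
      by_cases hMx : t.foldl max x = x
      · simp [hMx, add_assoc, (show x ≠ m by omega)]; omega
      · simp [hne, hMx, Ne.symm hMx, add_assoc]

-- A's filtered sum in terms of B's count-weighted subtraction
theorem pvSum_filter (l : List Int) (M : Int) :
    (l.filter (fun num => num != M)).sum = l.sum - M * (l.count M : Int) := by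
  induction l with
  | nil => simp
  | cons x t ih =>
    by_cases h : x = M
    · subst h; simp [ih]; ring
    · simp [h, ih]
      ring

-- ===== VERDICT (by name: the statement is the Claim_ definition above) =====
-- the whole post-parsing computation: A's three scans equal B's one pass, for every parsed list
theorem pvCore (nums : List Int) :
    pvCheckA nums = pvFinish (nums.foldl pvStep (0, none, 0)) := by
  cases nums with
  | nil => rfl
  | cons x t =>
    unfold pvCheckA pvFinish
    rw [PySem.List.max?_id_cons]
    have hfold : (x :: t).foldl pvStep (0, none, 0)
        = (x + t.sum, some (t.foldl max x),
           (if t.foldl max x = x then 1 else 0) + (t.count (t.foldl max x) : Int)) := by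
      have hstep : pvStep (0, none, 0) x = (x, some x, 1) := by simp [pvStep]
      rw [List.foldl_cons, hstep, pvFold_spec]
    rw [hfold]
    dsimp only
    set M := t.foldl max x
    have hcount : ((x :: t).count M : Int)
        = (if M = x then 1 else 0) + (t.count M : Int) := by
      by_cases hMx : M = x
      · simp [hMx, add_comm]
      · simp [hMx, Ne.symm hMx]
    have hsum := pvSum_filter (x :: t) M
    simp only [List.sum_cons] at hsum
    rw [hsum, hcount]

-- ===== VERDICT (by name: the statement is the Claim_ definition above) =====
theorem ArrayChallenge_spec : Claim_equal_ArrayChallenge := by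
  intro arr _ _
  unfold Spec_ArrayChallenge ArrayChallenge ArrayChallenge_alt
  by_cases h0 : arr == ""
  · rw [if_pos h0, if_pos h0]
  · rw [if_neg h0, if_neg h0]
    have hBA : pvNumsB arr = pvNumsA arr := rfl
    rw [hBA, pvCore]
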